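-- pv_equiv track=rewrite | github.com/TINABJan254/Python-PTIT | CODE_PTIT/DanhSach/PYKT072_XoayVongKyTu.py | solve
-- ===== SOURCE A (Python) =====
-- def rotate(a, b):
--     if (len(a) != len(b)):
--         return -1
--     s = a
--     for i in range(0, len(a) + 1):
--         if s == b:
--             return i
--         s = s[1::] + s[0]
--     return -1
--
-- def solve(a):
--     ans = 10000000
--     for x in a:
--         cnt = 0
--         for y in a:
--             tmp = rotate(y, x)
--             if tmp == -1:
--                 return -1
--             cnt += tmp
--         ans = min(ans, cnt)
--     return ans
-- ===== SOURCE B (Python) =====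
-- def solve(a):
--     # Every string must be a rotation of a[0]; rotation distance via first
--     # occurrence of the target in y+y (C-speed substring search instead of
--     # rotating character by character).
--     for y in a:
--         if len(y) != len(a[0]) or a[0] not in y + y:
--             return -1
--     costs = [sum((y + y).find(x) for y in a) for x in a]
--     return min([10000000] + costs)
-- ===== Notes on version B (the rewrite author's own statement) =====
-- stated objective: alternative
-- what changed: Replaces the character-by-character rotation trial inside each pair comparison with a single substring search ((y+y).find(x)) plus one upfront rotation-equivalence check against a[0]; drops a factor of L from the pair step (measured ~1.3-1.6x on the generated inputs, below the 1.5x bar at the largest size, so not claimed as faster).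
import Mathlib
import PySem

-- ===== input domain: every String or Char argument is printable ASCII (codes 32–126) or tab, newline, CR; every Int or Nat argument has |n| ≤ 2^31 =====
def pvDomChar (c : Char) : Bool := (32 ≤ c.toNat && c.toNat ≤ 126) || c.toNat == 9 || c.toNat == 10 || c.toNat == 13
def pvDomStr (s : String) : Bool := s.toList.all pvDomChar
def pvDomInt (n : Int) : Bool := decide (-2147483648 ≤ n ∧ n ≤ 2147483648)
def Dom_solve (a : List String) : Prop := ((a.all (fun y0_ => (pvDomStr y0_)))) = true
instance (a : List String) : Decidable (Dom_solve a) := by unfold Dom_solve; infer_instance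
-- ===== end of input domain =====

-- B replaces A's character-by-character rotation trial inside every pair comparison by a single
-- substring search in y+y, plus one upfront rotation-equivalence check against a[0] (alternative algorithm).


-- ===== PORT A =====
-- rotate(a, b): for i in range(0, len(a)+1): if s == b: return i; s = s[1::] + s[0]
-- (s.take 1 transcribes s[0] appended as a one-char string; exact for the nonempty s this
--  line ever sees — it runs only when len(a) = len(b) and s ≠ b, so s ≠ [] there)

def rotLoopA (b : List Char) : Nat → Int → List Char → Int
  | 0, _, _ => -1
  | fuel+1, i, s =>
      if s = b then i
      else rotLoopA b fuel (i + 1) (PySem.List.slice s (some 1) none ++ s.take 1)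

def rotate (a b : String) : Int :=
  if a.toList.length ≠ b.toList.length then -1
  else rotLoopA b.toList (a.toList.length + 1) 0 a.toList

-- inner 'for y in a' of A's solve: none = the early 'return -1'
def cntLoop (x : String) : Int → List String → Option Int
  | cnt, [] => some cnt
  | cnt, y :: ys =>
      let tmp := rotate y x
      if tmp = -1 then none else cntLoop x (cnt + tmp) ys

-- outer 'for x in a' of A's solve; Python's min(ans, cnt) is min on Int
def outerLoop (a : List String) : Int → List String → Int
  | ans, [] => ans
  | ans, x :: xs =>
      match cntLoop x 0 a with
      | none => -1
      | some cnt => outerLoop a (min ans cnt) xs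

def solve (a : List String) : Int := outerLoop a 10000000 a

-- ===== PORT B =====
-- (y + y).find(x)
def rotIdx (y x : List Char) : Int := PySem.Chars.find (y ++ y) x

-- for y in a: if len(y) != len(a[0]) or a[0] not in y + y: return -1
-- (h is a[0]; the loop body only runs when a is nonempty, where a.headD "" = a[0])
def allRot (h : List Char) : List String → Bool
  | [] => true
  | y :: ys =>
      if y.toList.length ≠ h.length ∨ PySem.Chars.isIn h (y.toList ++ y.toList) = false
      then false else allRot h ys

-- min([10000000] + costs) on that literally nonempty list is the running-min fold,
-- by PySem.List.min?_id_cons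
def solve_alt (a : List String) : Int :=
  if allRot (a.headD "").toList a then
    ((a.map (fun x => (a.map (fun y => rotIdx y.toList x.toList)).sum)).foldl min 10000000)
  else -1

-- ===== PRECONDITION & SPEC =====
def Spec_solve (a : List String) (out : Int) : Prop := out = solve_alt a
instance (a : List String) (out : Int) : Decidable (Spec_solve a out) := by unfold Spec_solve; infer_instance

-- ===== CLAIM (what is proved, stated in full; the proofs are below) =====
def Claim_equal_solve : Prop := ∀ (a : List String), Dom_solve a → Spec_solve a (solve a)

-- ===== LEMMAS AND PROOFS =====

-- left rotation by j, the value A's variable s carries after j iterations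

def rotBy (j : Nat) (y : List Char) : List Char := y.drop j ++ y.take j

theorem rotBy_step (y : List Char) (n : Nat) (hn : n < y.length) :
    PySem.List.slice (rotBy n y) (some 1) none ++ (rotBy n y).take 1 = rotBy (n+1) y := by
  rw [PySem.List.slice_from_one]
  unfold rotBy
  rw [List.drop_eq_getElem_cons hn]
  rw [show y.take (n+1) = y.take n ++ [y[n]] by
    rw [List.take_add_one, List.getElem?_eq_getElem hn]; rfl]
  simp only [List.cons_append, List.tail_cons, List.take_succ_cons, List.take_zero,
    List.append_assoc]

theorem rotBy_zero (y : List Char) : rotBy 0 y = y := by simp [rotBy]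


theorem prefix_drop_iff_rot (x y : List Char) (hL : x.length = y.length) (j : Nat)
    (hj : j ≤ y.length) : x <+: (y ++ y).drop j ↔ x = rotBy j y := by
  rw [List.drop_append_of_le_length hj]
  constructor
  · intro h
    rw [List.prefix_iff_eq_take] at h
    rw [h, hL, List.take_append]
    simp [rotBy]
    congr 1
    · rw [List.take_of_length_le]; simp
    · congr 1; omega
  · intro h
    rw [h]
    unfold rotBy
    exact (List.prefix_append_right_inj _).mpr (List.take_prefix j y)

theorem loopA_miss (x y : List Char) (hmiss : ∀ k ≤ y.length, rotBy k y ≠ x) :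
    ∀ (fuel n : Nat), n + fuel ≤ y.length + 1 →
      rotLoopA x fuel (n : Int) (rotBy n y) = -1 := by
  intro fuel
  induction fuel with
  | zero => intro n _; rfl
  | succ m ih =>
    intro n hn
    rw [rotLoopA, if_neg (hmiss n (by omega))]
    match m, ih with
    | 0, _ => rfl
    | m'+1, ih =>
      rw [rotBy_step y n (by omega)]
      have : ((n : Int) + 1) = ((n + 1 : Nat) : Int) := by push_cast; ring
      rw [this]
      exact ih (n+1) (by omega)

theorem loopA_hit (x y : List Char) (j : Nat) (hjL : j ≤ y.length)
    (hhit : rotBy j y = x) (hmin : ∀ k < j, rotBy k y ≠ x) :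
    ∀ (fuel n : Nat), n ≤ j → j < n + fuel →
      rotLoopA x fuel (n : Int) (rotBy n y) = (j : Int) := by
  intro fuel
  induction fuel with
  | zero => intro n _ h; omega
  | succ m ih =>
    intro n hnj hjf
    rcases eq_or_lt_of_le hnj with rfl | hlt
    · rw [rotLoopA, if_pos hhit]
    · rw [rotLoopA, if_neg (hmin n hlt)]
      rw [rotBy_step y n (by omega)]
      have : ((n : Int) + 1) = ((n + 1 : Nat) : Int) := by push_cast; ring
      rw [this]
      exact ih (n+1) (by omega) (by omega)

theorem rotate_eq_rotIdx (y x : List Char) (hL : y.length = x.length) :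
    rotLoopA x (y.length + 1) 0 y = rotIdx y x := by
  have h0 : (0 : Int) = ((0 : Nat) : Int) := rfl
  by_cases hin : x <:+: (y ++ y)
  · have hf : 0 ≤ PySem.Chars.find (y ++ y) x := (PySem.Chars.find_nonneg_iff _ _).mpr hin
    set j := (PySem.Chars.find (y ++ y) x).toNat with hj
    obtain ⟨hpre, hmin⟩ := PySem.Chars.find_spec (s := y ++ y) (sub := x) hf
    have hle : (PySem.Chars.find (y ++ y) x) ≤ (y ++ y).length := PySem.Chars.find_le_length _ _
    have hlen : x.length ≤ ((y ++ y).drop j).length := hpre.length_le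
    simp only [List.length_drop, List.length_append] at hlen
    have hjeq : (j : Int) = PySem.Chars.find (y ++ y) x := Int.toNat_of_nonneg hf
    have hjL : j ≤ y.length := by
      rw [← hjeq] at hle
      simp only [List.length_append] at hle hlen
      omega
    have hhit : rotBy j y = x :=
      ((prefix_drop_iff_rot x y (by omega) j hjL).mp hpre).symm
    have hmin' : ∀ k < j, rotBy k y ≠ x := by
      intro k hk hcon
      exact hmin k hk ((prefix_drop_iff_rot x y (by omega) k (by omega)).mpr hcon.symm)
    have hrun := loopA_hit x y j hjL hhit hmin' (y.length + 1) 0 (by omega) (by omega)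
    rw [rotBy_zero] at hrun
    rw [h0, hrun]
    unfold rotIdx
    exact hjeq
  · have hf : PySem.Chars.find (y ++ y) x = -1 := (PySem.Chars.find_eq_neg_one_iff _ _).mpr hin
    have hmiss : ∀ k ≤ y.length, rotBy k y ≠ x := by
      intro k hk hcon
      apply hin
      have : x <+: (y ++ y).drop k := (prefix_drop_iff_rot x y (by omega) k hk).mpr hcon.symm
      exact ((PySem.Chars.exists_prefix_drop_iff_isIn x (y ++ y)).mp ⟨k, this⟩) |>
        (fun h => (PySem.Chars.isIn_iff_infix x (y ++ y)).mp h)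
    have hrun := loopA_miss x y hmiss (y.length + 1) 0 (by omega)
    rw [rotBy_zero] at hrun
    rw [h0, hrun, rotIdx, hf]

theorem check_iff_isRotated (y h : List Char) :
    (y.length = h.length ∧ PySem.Chars.isIn h (y ++ y) = true) ↔ y ~r h := by
  constructor
  · rintro ⟨hlen, hin⟩
    obtain ⟨j, hpre⟩ := (PySem.Chars.exists_prefix_drop_iff_isIn h (y ++ y)).mpr hin
    rcases Nat.eq_zero_or_pos y.length with hy0 | hy0
    · have : y = [] := List.length_eq_zero_iff.mp hy0
      have : h = [] := List.length_eq_zero_iff.mp (by omega)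
      subst_vars
      exact List.IsRotated.refl _
    · have hlj : h.length ≤ ((y ++ y).drop j).length := hpre.length_le
      simp only [List.length_drop, List.length_append] at hlj
      have hjL : j ≤ y.length := by omega
      have heq : h = rotBy j y := (prefix_drop_iff_rot h y (by omega) j hjL).mp hpre
      exact ⟨j, by rw [List.rotate_eq_drop_append_take hjL]; exact heq.symm⟩
  · intro hrot
    have hlen : y.length = h.length := hrot.perm.length_eq
    refine ⟨hlen, ?_⟩
    obtain ⟨n, hn⟩ := hrot
    rcases Nat.eq_zero_or_pos y.length with hy0 | hy0
    · have hy : y = [] := List.length_eq_zero_iff.mp hy0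
      have hh : h = [] := List.length_eq_zero_iff.mp (by omega)
      subst_vars
      exact PySem.Chars.isIn_nil _
    · have hm : n % y.length ≤ y.length := le_of_lt (Nat.mod_lt _ hy0)
      have hrot' : y.rotate (n % y.length) = h := by rw [List.rotate_mod]; exact hn
      rw [List.rotate_eq_drop_append_take hm] at hrot'
      have hpre : h <+: (y ++ y).drop (n % y.length) :=
        (prefix_drop_iff_rot h y (by omega) _ hm).mpr hrot'.symm
      exact (PySem.Chars.exists_prefix_drop_iff_isIn h (y ++ y)).mp ⟨_, hpre⟩

theorem rotIdx_nonneg (y x : List Char) (h : y ~r x) : 0 ≤ rotIdx y x := by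
  apply (PySem.Chars.find_nonneg_iff _ _).mpr
  exact (PySem.Chars.isIn_iff_infix _ _).mp ((check_iff_isRotated y x).mpr h).2

theorem rotate_str_eq_rotIdx (y x : String) (h : y.toList ~r x.toList) :
    rotate y x = rotIdx y.toList x.toList := by
  have hlen : y.toList.length = x.toList.length := h.perm.length_eq
  rw [rotate, if_neg (by omega)]
  exact rotate_eq_rotIdx _ _ hlen

theorem rotate_neg (y x : String) (h : ¬ (y.toList ~r x.toList)) : rotate y x = -1 := by
  rw [rotate]
  by_cases hlen : y.toList.length = x.toList.length
  · rw [if_neg (by omega), rotate_eq_rotIdx _ _ hlen, rotIdx]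
    apply (PySem.Chars.find_eq_neg_one_iff _ _).mpr
    intro hin
    exact h ((check_iff_isRotated _ _).mp
      ⟨hlen, (PySem.Chars.isIn_iff_infix _ _).mpr hin⟩)
  · rw [if_pos hlen]

theorem cntLoop_some (x : String) :
    ∀ (ys : List String), (∀ y ∈ ys, y.toList ~r x.toList) → ∀ c,
      cntLoop x c ys = some (c + (ys.map (fun y => rotIdx y.toList x.toList)).sum) := by
  intro ys
  induction ys with
  | nil => intro _ c; simp [cntLoop]
  | cons y t ih =>
    intro hall c
    have hy := hall y (by simp)
    have hpos : 0 ≤ rotIdx y.toList x.toList := rotIdx_nonneg _ _ hy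
    rw [cntLoop]
    simp only [rotate_str_eq_rotIdx y x hy]
    rw [if_neg (by omega)]
    rw [ih (fun z hz => hall z (by simp [hz])) _]
    simp
    ring

theorem cntLoop_none (x : String) :
    ∀ (ys : List String), (∃ y ∈ ys, rotate y x = -1) → ∀ c,
      cntLoop x c ys = none := by
  intro ys
  induction ys with
  | nil => rintro ⟨y, hy, _⟩; simp at hy
  | cons y t ih =>
    rintro ⟨z, hz, hzr⟩ c
    rw [cntLoop]
    rcases List.mem_cons.mp hz with rfl | hzt
    · rw [if_pos hzr]
    · by_cases hy : rotate y x = -1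
      · rw [if_pos hy]
      · rw [if_neg hy]
        exact ih ⟨z, hzt, hzr⟩ _

theorem outerLoop_eq (a : List String)
    (hall : ∀ x ∈ a, ∀ y ∈ a, y.toList ~r x.toList) :
    ∀ (xs : List String), xs ⊆ a → ∀ ans,
      outerLoop a ans xs =
        (xs.map (fun x => (a.map (fun y => rotIdx y.toList x.toList)).sum)).foldl min ans := by
  intro xs
  induction xs with
  | nil => intro _ ans; rfl
  | cons x t ih =>
    intro hsub ans
    rw [outerLoop]
    rw [cntLoop_some x a (hall x (hsub (by simp))) 0]
    simp only [zero_add, List.map_cons, List.foldl_cons]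
    exact ih (fun z hz => hsub (by simp [hz])) _

theorem allRot_iff (h : List Char) :
    ∀ (ys : List String), allRot h ys = true ↔
      ∀ y ∈ ys, y.toList.length = h.length ∧
        PySem.Chars.isIn h (y.toList ++ y.toList) = true := by
  intro ys
  induction ys with
  | nil => simp [allRot]
  | cons y t ih =>
    rw [allRot]
    split_ifs with hc
    · simp only [false_iff]
      intro hcon
      obtain ⟨h1, h2⟩ := hcon y (by simp)
      rcases hc with hc | hc
      · exact hc h1
      · rw [h2] at hc; simp at hc
    · push Not at hc
      rw [ih]
      constructor
      · intro hall z hz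
        rcases List.mem_cons.mp hz with rfl | hzt
        · exact ⟨hc.1, by simpa using hc.2⟩
        · exact hall z hzt
      · intro hall z hz; exact hall z (by simp [hz])

theorem solve_eq_alt (a : List String) : solve a = solve_alt a := by
  cases a with
  | nil => rfl
  | cons h t =>
    by_cases hv : ∀ y ∈ (h :: t), y.toList ~r h.toList
    · have hcheck : allRot (List.headD (h :: t) "").toList (h :: t) = true := by
        rw [allRot_iff]
        intro y hy
        have := (check_iff_isRotated y.toList h.toList).mpr (hv y hy)
        simpa using this
      rw [solve_alt, if_pos hcheck]
      rw [solve]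
      rw [outerLoop_eq (h :: t) ?pairs (h :: t) (fun z hz => hz) 10000000]
      case pairs =>
        intro x hx y hy
        exact (hv y hy).trans (hv x hx).symm
    · rw [solve_alt, if_neg ?hc]
      case hc =>
        intro hcon
        apply hv
        intro y hy
        rw [allRot_iff] at hcon
        have := hcon y hy
        exact (check_iff_isRotated y.toList h.toList).mp (by simpa using this)
      push Not at hv
      obtain ⟨y, hy, hyr⟩ := hv
      rw [solve, outerLoop]
      rw [cntLoop_none h (h :: t) ⟨y, hy, rotate_neg y h hyr⟩ 0]

-- ===== VERDICT (by name: the statement is the Claim_ definition above) =====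
theorem solve_spec : Claim_equal_solve := by
  intro a _
  show solve a = solve_alt a
  exact solve_eq_alt a
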